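-- pv_equiv track=rewrite | github.com/CEGB03/DHS-Compilador_CEGB | src/main/python/Optimizador.py | eliminacion_codigo_inalcanzable
-- ===== SOURCE A (Python) =====
-- def eliminacion_codigo_inalcanzable(codigo):
--     codOptimizado = []
--     etiquetas_utilizadas = set()
--
--     # Detectar etiquetas referenciadas
--     for linea in codigo:
--         if 'jmp' in linea or 'ifnjmp' in linea:
--             partes = linea.strip().split()
--             if partes[-1].startswith('l'):
--                 etiquetas_utilizadas.add(partes[-1])
--
--     saltar = False
--     for i, linea in enumerate(codigo):
--         linea_strip = linea.strip()
--         if linea_strip.startswith('label'):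
--             etiqueta = linea_strip.split()[1]
--             if etiqueta in etiquetas_utilizadas or i == 0:
--                 saltar = False
--                 codOptimizado.append(linea)
--             else:
--                 saltar = True
--         elif saltar:
--             continue
--         else:
--             codOptimizado.append(linea)
--     return codOptimizado
-- ===== SOURCE B (Python) =====
-- def eliminacion_codigo_inalcanzable(codigo):
--     etiquetas_utilizadas = set()
--
--     # Detectar etiquetas referenciadas (same first pass as the original)
--     for linea in codigo:
--         if 'jmp' in linea or 'ifnjmp' in linea:
--             partes = linea.strip().split()
--             if partes[-1].startswith('l'):
--                 etiquetas_utilizadas.add(partes[-1])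
--
--     # Split the code into segments: a preamble plus one segment per 'label' line.
--     segmentos = []
--     actual = (None, [])  # (índice del label, líneas del segmento)
--     for i, linea in enumerate(codigo):
--         if linea.strip().startswith('label'):
--             segmentos.append(actual)
--             actual = (i, [linea])
--         else:
--             actual[1].append(linea)
--     segmentos.append(actual)
--
--     # Keep the preamble, the segment whose label is the first line, and used labels.
--     resultado = []
--     for idx, lineas in segmentos:
--         if idx is None or idx == 0 or lineas[0].strip().split()[1] in etiquetas_utilizadas:
--             resultado.extend(lineas)
--     return resultado
-- ===== Notes on version B (the rewrite author's own statement) =====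
-- stated objective: alternative
-- what changed: The second pass's stateful skip flag is replaced by an explicit decomposition: the code is split into label-headed segments (plus a preamble), each segment is tagged keep/drop by one predicate (preamble, label at index 0, or used label), and the kept segments are concatenated.
-- outside the precondition, e.g. on eliminacion_codigo_inalcanzable(['label']): A raises IndexError, B returns ['label']
import Mathlib
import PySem

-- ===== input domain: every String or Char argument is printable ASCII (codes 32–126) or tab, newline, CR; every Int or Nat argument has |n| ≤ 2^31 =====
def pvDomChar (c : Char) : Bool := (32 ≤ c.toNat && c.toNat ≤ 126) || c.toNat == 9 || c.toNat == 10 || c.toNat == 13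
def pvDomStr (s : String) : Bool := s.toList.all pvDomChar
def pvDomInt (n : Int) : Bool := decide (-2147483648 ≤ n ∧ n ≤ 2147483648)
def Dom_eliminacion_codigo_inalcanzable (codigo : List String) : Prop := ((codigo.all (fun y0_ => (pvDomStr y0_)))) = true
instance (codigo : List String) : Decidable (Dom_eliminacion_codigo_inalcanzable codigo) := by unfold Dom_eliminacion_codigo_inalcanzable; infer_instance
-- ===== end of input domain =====

-- B replaces A's stateful skip flag with an explicit segment-then-filter decomposition (objective: alternative, same cost).

-- ===== PORT A =====
-- first pass, shared verbatim by both Pythons: collect referenced labels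
def pvEtiquetas (codigo : List String) : PySem.Set String :=
  codigo.foldl (fun s linea =>
    if PySem.Str.isIn "jmp" linea || PySem.Str.isIn "ifnjmp" linea then
      match PySem.List.pyGet? (PySem.Str.split₀ (PySem.Str.strip linea)) (-1) with
      | some last => if PySem.Str.startswith last "l" then PySem.Set.add s last else s
      | none => s  -- partes[-1] IndexError: unreachable, a line containing 'jmp' strips to a nonempty string
    else s) PySem.Set.empty

-- body of A's second for-loop; state = (saltar, codOptimizado)
def pvStepA (us : PySem.Set String) (st : Bool × List String) (p : Int × String) : Bool × List String :=
  let lineaStrip := PySem.Str.strip p.2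
  if PySem.Str.startswith lineaStrip "label" then
    match PySem.List.pyGet? (PySem.Str.split₀ lineaStrip) 1 with
    | some etiqueta =>
        if PySem.Set.contains us etiqueta || p.1 == 0 then (false, st.2 ++ [p.2])
        else (true, st.2)
    | none => st  -- split()[1] IndexError in Python; excluded by Pre_
  else if st.1 then st
  else (st.1, st.2 ++ [p.2])

def eliminacion_codigo_inalcanzable (codigo : List String) : List String :=
  let etiquetas_utilizadas := pvEtiquetas codigo
  ((PySem.List.enumerate codigo).foldl (pvStepA etiquetas_utilizadas) (false, [])).2

-- ===== PORT B =====
-- keep-flag of a segment: preamble, label at index 0, or a used label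
def pvSeConserva (usadas : PySem.Set String) (seg : Option Int × List String) : Bool :=
  match seg with
  | (none, _) => true
  | (some idx, lineas) =>
      idx == 0 ||
      (match lineas with
       | [] => false  -- unreachable: a labeled segment starts with its label line
       | l0 :: _ =>
          match PySem.List.pyGet? (PySem.Str.split₀ (PySem.Str.strip l0)) 1 with
          | some e => PySem.Set.contains usadas e
          | none => false)  -- split()[1] IndexError in Python; excluded by Pre_

-- body of B's segmentation loop; state = (segmentos, actual)
def pvStepB (st : List (Option Int × List String) × (Option Int × List String))
    (p : Int × String) : List (Option Int × List String) × (Option Int × List String) :=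
  if PySem.Str.startswith (PySem.Str.strip p.2) "label" then
    (st.1 ++ [st.2], (some p.1, [p.2]))
  else
    (st.1, (st.2.1, st.2.2 ++ [p.2]))

def eliminacion_codigo_inalcanzable_alt (codigo : List String) : List String :=
  let etiquetas_utilizadas := pvEtiquetas codigo
  let st := (PySem.List.enumerate codigo).foldl pvStepB ([], (none, []))
  (st.1 ++ [st.2]).foldl
    (fun acc seg => if pvSeConserva etiquetas_utilizadas seg then acc ++ seg.2 else acc) []

-- ===== PRECONDITION & SPEC =====
-- Pre_ excludes exactly the inputs on which A raises IndexError: a line stripping to 'label' with no second token.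
def Pre_eliminacion_codigo_inalcanzable (codigo : List String) : Prop :=
  ∀ linea ∈ codigo, PySem.Str.startswith (PySem.Str.strip linea) "label" = true →
    2 ≤ (PySem.Str.split₀ (PySem.Str.strip linea)).length
instance (codigo : List String) : Decidable (Pre_eliminacion_codigo_inalcanzable codigo) := by
  unfold Pre_eliminacion_codigo_inalcanzable; infer_instance

def pvWitness_eliminacion_codigo_inalcanzable : List String :=
  ["mov a b", "jmp l1", "label l1", "label l2", "add x", "jmp x"]

def Spec_eliminacion_codigo_inalcanzable (codigo : List String) (out : List String) : Prop := out = eliminacion_codigo_inalcanzable_alt codigo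
instance (codigo : List String) (out : List String) : Decidable (Spec_eliminacion_codigo_inalcanzable codigo out) := by unfold Spec_eliminacion_codigo_inalcanzable; infer_instance

-- ===== CLAIM (what is proved, stated in full; the proofs are below) =====
def Claim_equal_eliminacion_codigo_inalcanzable : Prop := ∀ (codigo : List String), Dom_eliminacion_codigo_inalcanzable codigo → Pre_eliminacion_codigo_inalcanzable codigo → Spec_eliminacion_codigo_inalcanzable codigo (eliminacion_codigo_inalcanzable codigo)

-- ===== LEMMAS AND PROOFS =====

-- common recursive specification of the second pass
def pvRun (us : PySem.Set String) (saltar : Bool) : List (Int × String) → List String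
  | [] => []
  | (i, s) :: rest =>
      if PySem.Str.startswith (PySem.Str.strip s) "label" then
        match PySem.List.pyGet? (PySem.Str.split₀ (PySem.Str.strip s)) 1 with
        | some e =>
            if PySem.Set.contains us e || i == 0 then s :: pvRun us false rest
            else pvRun us true rest
        | none => pvRun us saltar rest
      else if saltar then pvRun us saltar rest
      else s :: pvRun us saltar rest

def pvPreL (l : List (Int × String)) : Prop :=
  ∀ p ∈ l, PySem.Str.startswith (PySem.Str.strip p.2) "label" = true →
    2 ≤ (PySem.Str.split₀ (PySem.Str.strip p.2)).length

def pvKeep (us : PySem.Set String) (seg : Option Int × List String) : List String :=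
  if pvSeConserva us seg then seg.2 else []

-- A's fold equals the specification, with the accumulator out front
set_option maxHeartbeats 1000000 in
theorem pvA_run (us : PySem.Set String) (l : List (Int × String)) :
    ∀ (saltar : Bool) (acc : List String),
      (l.foldl (pvStepA us) (saltar, acc)).2 = acc ++ pvRun us saltar l := by
  induction l with
  | nil => intro saltar acc; rw [List.foldl_nil, pvRun, List.append_nil]
  | cons p rest ih =>
      intro saltar acc
      obtain ⟨i, s⟩ := p
      rw [List.foldl_cons]
      simp only [pvStepA, pvRun]
      by_cases h : PySem.Str.startswith (PySem.Str.strip s) "label" = true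
      · rw [if_pos h, if_pos h]
        cases hg : PySem.List.pyGet? (PySem.Str.split₀ (PySem.Str.strip s)) 1 with
        | none => exact ih saltar acc
        | some e =>
            dsimp only
            by_cases hk : (PySem.Set.contains us e || i == 0) = true
            · rw [if_pos hk, if_pos hk, ih]; simp
            · rw [if_neg hk, if_neg hk, ih]
      · rw [if_neg h, if_neg h]
        cases saltar with
        | true => exact ih true acc
        | false => rw [ih]; simp

-- the filter loop of B, rewritten as a flatMap
theorem pvFilt_eq (us : PySem.Set String) (segs : List (Option Int × List String))
    (a : List String) :
    segs.foldl (fun acc seg => if pvSeConserva us seg then acc ++ seg.2 else acc) a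
      = a ++ segs.flatMap (pvKeep us) := by
  have h : (fun (acc : List String) seg => if pvSeConserva us seg then acc ++ seg.2 else acc)
      = fun acc seg => acc ++ pvKeep us seg := by
    funext acc seg; unfold pvKeep; split <;> simp
  rw [h, PySem.List.foldl_append_eq_flatMap]

-- keep-flag ignores lines appended to a well-formed segment
theorem pvConserva_append (us : PySem.Set String) (o : Option Int) (ls : List String) (s : String)
    (hwf : o = none ∨ ls ≠ []) :
    pvSeConserva us (o, ls ++ [s]) = pvSeConserva us (o, ls) := by
  cases o with
  | none => rfl
  | some i =>
      cases ls with
      | nil => exact absurd rfl (hwf.resolve_left (by simp))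
      | cons a t => rfl

-- B's segmentation-then-filter equals kept prefix plus the specification
theorem pvB_run (us : PySem.Set String) (l : List (Int × String)) :
    ∀ (segs : List (Option Int × List String)) (actual : Option Int × List String)
      (saltar : Bool), pvPreL l → (actual.1 = none ∨ actual.2 ≠ []) →
      pvSeConserva us actual = !saltar →
      (((l.foldl pvStepB (segs, actual)).1 ++ [(l.foldl pvStepB (segs, actual)).2]).foldl
        (fun acc seg => if pvSeConserva us seg then acc ++ seg.2 else acc) [])
      = segs.flatMap (pvKeep us) ++ pvKeep us actual ++ pvRun us saltar l := by
  induction l with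
  | nil =>
      intro segs actual saltar _ _ _
      rw [List.foldl_nil, pvFilt_eq]
      simp [pvRun]
  | cons p rest ih =>
      intro segs actual saltar hpre hwf hc
      obtain ⟨i, s⟩ := p
      have hpre' : pvPreL rest := fun q hq => hpre q (List.mem_cons_of_mem _ hq)
      rw [List.foldl_cons]
      simp only [pvStepB, pvRun]
      by_cases h : PySem.Str.startswith (PySem.Str.strip s) "label" = true
      · rw [if_pos h, if_pos h]
        -- the label has a second token, by Pre_
        have hlen : 2 ≤ (PySem.Str.split₀ (PySem.Str.strip s)).length :=
          hpre (i, s) (List.mem_cons_self) h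
        have hg : PySem.List.pyGet? (PySem.Str.split₀ (PySem.Str.strip s)) 1
            = some (PySem.Str.split₀ (PySem.Str.strip s))[1] := by
          exact_mod_cast PySem.List.pyGet?_ofNat _ 1 (by omega)
        set e := (PySem.Str.split₀ (PySem.Str.strip s))[1] with he
        have hc' : pvSeConserva us (some i, [s]) = (i == 0 || PySem.Set.contains us e) := by
          simp only [pvSeConserva, hg]
        rw [ih (segs ++ [actual]) (some i, [s])
              (!pvSeConserva us (some i, [s])) hpre' (Or.inr (by simp)) (by simp)]
        rw [hg]
        simp only [List.flatMap_append, List.flatMap_cons, List.flatMap_nil, List.append_nil]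
        by_cases hk : (PySem.Set.contains us e || i == 0) = true
        · have hcs : pvSeConserva us (some i, [s]) = true := by
            rw [hc', Bool.or_comm]; exact hk
          rw [if_pos hk]
          simp only [pvKeep, hcs, if_true, Bool.not_true]
          simp
        · have hcs : pvSeConserva us (some i, [s]) = false := by
            rw [hc', Bool.or_comm]; simpa using hk
          rw [if_neg hk]
          simp only [pvKeep, hcs, Bool.not_false]
          simp
      · rw [if_neg h, if_neg h]
        have hc2 : pvSeConserva us (actual.1, actual.2 ++ [s]) = !saltar := by
          rw [pvConserva_append us actual.1 actual.2 s hwf]; exact hc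
        rw [ih segs (actual.1, actual.2 ++ [s]) saltar hpre' (Or.inr (by simp)) hc2]
        cases saltar with
        | true =>
            have : pvSeConserva us actual = false := by simpa using hc
            simp only [pvKeep, hc2, this]
            simp
        | false =>
            have hct : pvSeConserva us actual = true := by simpa using hc
            simp only [pvKeep, hc2, hct, if_pos, Bool.not_false]
            simp

-- ===== VERDICT (by name: the statement is the Claim_ definition above) =====
theorem eliminacion_codigo_inalcanzable_spec : Claim_equal_eliminacion_codigo_inalcanzable := by
  intro codigo _ hpre
  unfold Spec_eliminacion_codigo_inalcanzable
  unfold eliminacion_codigo_inalcanzable eliminacion_codigo_inalcanzable_alt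
  have hpreL : pvPreL (PySem.List.enumerate codigo) := by
    intro p hp
    rcases (PySem.List.mem_enumerate_iff _ _ _).mp hp with ⟨k, hk, rfl⟩
    exact hpre _ (List.getElem_mem hk)
  rw [pvA_run, pvB_run (pvEtiquetas codigo) (PySem.List.enumerate codigo) [] (none, []) false
        hpreL (Or.inl rfl) rfl]
  simp [pvKeep, pvSeConserva]
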